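-- pv_equiv track=rewrite | github.com/MaxSaunders/1aDay | string_splosion.py | string_splosion
-- ===== SOURCE A (Python) =====
-- def string_splosion(str):
--   out = ""
--   str2 = ""
--   a = 0
--   while(a < len(str)):
--     str2 += str[a]  #stores string of chars and adds next char
--     out += str2     #adds string of chars to final string
--     a += 1
--   return out
-- ===== SOURCE B (Python) =====
-- def string_splosion(str):
--   return "".join(str[:i+1] for i in range(len(str)))
-- ===== Notes on version B (the rewrite author's own statement) =====
-- stated objective: simpler
-- what changed: Replaces the while-loop maintaining two running accumulators (str2 and out) with a direct str.join of independently sliced prefixes; no incremental state is kept.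
import Mathlib
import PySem

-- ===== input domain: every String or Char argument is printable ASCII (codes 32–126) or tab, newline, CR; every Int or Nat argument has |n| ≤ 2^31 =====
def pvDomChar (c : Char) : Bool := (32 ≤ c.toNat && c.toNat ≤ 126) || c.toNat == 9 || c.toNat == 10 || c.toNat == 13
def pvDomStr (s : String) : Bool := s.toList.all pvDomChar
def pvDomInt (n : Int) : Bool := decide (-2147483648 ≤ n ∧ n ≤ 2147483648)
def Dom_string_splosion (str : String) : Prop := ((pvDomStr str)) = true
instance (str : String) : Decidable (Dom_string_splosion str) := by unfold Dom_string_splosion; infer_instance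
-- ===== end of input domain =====

-- B replaces A's while-loop with its two running accumulators by a direct join of sliced prefixes (simpler decomposition, same cost).

-- ===== PORT A =====
-- while(a < len(str)): str2 += str[a]; out += str2; a += 1
def spLoopA (l : List Char) (a : Nat) (str2 out : List Char) : List Char :=
  if h : a < l.length then
    spLoopA l (a + 1) (str2 ++ [l[a]]) (out ++ (str2 ++ [l[a]]))
  else out
termination_by l.length - a

def string_splosion (str : String) : String :=
  String.mk (spLoopA str.toList 0 [] [])

-- ===== PORT B =====
-- "".join(str[:i+1] for i in range(len(str)))
def string_splosion_alt (str : String) : String :=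
  String.mk (((PySem.List.pyRange 0 (str.toList.length : Int) 1).map
    (fun i => PySem.List.slice str.toList none (some (i + 1)))).flatten)

-- ===== PRECONDITION & SPEC =====
def Spec_string_splosion (str : String) (out : String) : Prop := out = string_splosion_alt str
instance (str : String) (out : String) : Decidable (Spec_string_splosion str out) := by unfold Spec_string_splosion; infer_instance

-- ===== CLAIM (what is proved, stated in full; the proofs are below) =====
def Claim_equal_string_splosion : Prop := ∀ (str : String), Dom_string_splosion str → Spec_string_splosion str (string_splosion str)

-- ===== LEMMAS AND PROOFS =====
lemma spLoopA_eq (l : List Char) : ∀ (n a : Nat) (out : List Char), n = l.length - a →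
    spLoopA l a (l.take a) out =
      out ++ ((List.range' (a + 1) n).map (fun i => l.take i)).flatten := by
  intro n
  induction n with
  | zero =>
    intro a out h
    rw [spLoopA, dif_neg (by omega)]
    simp [List.range']
  | succ m ih =>
    intro a out h
    rw [spLoopA]
    have ha : a < l.length := by omega
    simp only [ha, dif_pos]
    have htake : l.take a ++ [l[a]] = l.take (a + 1) := by
      rw [List.take_add_one, List.getElem?_eq_getElem ha]
      simp
    rw [htake, ih (a + 1) _ (by omega)]
    simp [List.range'_succ]

-- ===== VERDICT (by name: the statement is the Claim_ definition above) =====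
theorem string_splosion_spec : Claim_equal_string_splosion := by
  intro s _
  unfold Spec_string_splosion string_splosion string_splosion_alt
  have h0 := spLoopA_eq s.toList (s.toList.length) 0 [] (by omega)
  simp only [List.take_zero] at h0
  rw [h0]
  rw [PySem.List.pyRange_one]
  simp only [Int.sub_zero, Int.toNat_natCast, List.map_map]
  congr 1
  have : List.range' 1 s.toList.length = (List.range s.toList.length).map (· + 1) := by
    rw [List.range'_eq_map_range]
    exact List.map_congr_left (fun k _ => by omega)
  rw [this, List.map_map]
  simp only [List.nil_append]
  congr 1
  apply List.map_congr_left
  intro k _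
  simp only [Function.comp]
  rw [show ((0 : Int) + (k : Int) + 1) = ((k + 1 : Nat) : Int) by push_cast; ring]
  rw [PySem.List.slice_to_natCast]
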